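-- pv_equiv track=rewrite | github.com/leew0nseok/algorithm | 프로그래머스/1/86491. 최소직사각형/최소직사각형.py | solution
-- ===== SOURCE A (Python) =====
-- def solution(sizes):
--     x = []
--     y = []
--     for size in sizes:
--         if size[0] > size[1]:
--             x.append(size[0])
--             y.append(size[1])
--         else:
--             x.append(size[1])
--             y.append(size[0])
--
--     answer = max(x) * max(y)
--     return answer
-- ===== SOURCE B (Python) =====
-- def solution(sizes):
--     # recursive: compute the (width, height) of the bounding rectangle of a
--     # non-empty suffix of cards, combining head and tail with componentwise max
--     def rect(cards):
--         a, b = cards[0][0], cards[0][1]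
--         w, h = (a, b) if a >= b else (b, a)
--         if len(cards) == 1:
--             return (w, h)
--         w2, h2 = rect(cards[1:])
--         return (max(w, w2), max(h, h2))
--     w, h = rect(sizes)
--     return w * h
-- ===== Notes on version B (the rewrite author's own statement) =====
-- stated objective: alternative
-- what changed: Replaces A's iterative branching loop that builds two parallel side lists and reduces each with max() by a recursive function returning the bounding (width,height) pair of each suffix, combining head and tail with componentwise max and multiplying once at the end.
import Mathlib
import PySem

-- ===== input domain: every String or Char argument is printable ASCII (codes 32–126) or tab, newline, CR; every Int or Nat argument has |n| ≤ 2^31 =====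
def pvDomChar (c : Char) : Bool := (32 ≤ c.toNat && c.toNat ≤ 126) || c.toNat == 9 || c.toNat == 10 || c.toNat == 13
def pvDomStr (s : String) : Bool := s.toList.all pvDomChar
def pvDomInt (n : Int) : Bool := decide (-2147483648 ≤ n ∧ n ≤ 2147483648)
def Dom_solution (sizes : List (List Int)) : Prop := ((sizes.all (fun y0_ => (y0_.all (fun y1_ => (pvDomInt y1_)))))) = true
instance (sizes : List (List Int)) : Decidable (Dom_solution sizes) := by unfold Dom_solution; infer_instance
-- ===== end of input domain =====

-- B replaces A's branching loop over two parallel lists by a recursion returning the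
-- bounding (width, height) pair of each suffix; return value only.
-- ===== PORT A =====
def solution (sizes : List (List Int)) : Int :=
  let xy := sizes.foldl (fun (xy : List Int × List Int) size =>
    let a := (PySem.List.pyGet? size 0).getD 0
    let b := (PySem.List.pyGet? size 1).getD 0
    if a > b then (xy.1 ++ [a], xy.2 ++ [b]) else (xy.1 ++ [b], xy.2 ++ [a])) ([], [])
  let answer := ((PySem.List.max? xy.1 (fun v => v)).getD 0) * ((PySem.List.max? xy.2 (fun v => v)).getD 0)
  answer

-- ===== PORT B =====
-- rect(cards): (width, height) of the bounding rectangle of a non-empty card list.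
-- The [] case is unreachable in B (Python raises IndexError there; excluded by Pre_).
def pvRect : List (List Int) → Int × Int
  | [] => (0, 0)
  | c :: rest =>
      let a := (PySem.List.pyGet? c 0).getD 0
      let b := (PySem.List.pyGet? c 1).getD 0
      let wh := if a ≥ b then (a, b) else (b, a)
      match rest with
      | [] => wh
      | r :: rs =>
          let wh2 := pvRect (r :: rs)
          (max wh.1 wh2.1, max wh.2 wh2.2)

def solution_alt (sizes : List (List Int)) : Int :=
  let wh := pvRect sizes
  wh.1 * wh.2

-- ===== PRECONDITION & SPEC =====
-- Pre_ excludes inputs on which Python A raises: the empty list (max of empty → ValueError)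
-- and any card with fewer than two entries (size[1] → IndexError).
def Pre_solution (sizes : List (List Int)) : Prop :=
  sizes ≠ [] ∧ ∀ s ∈ sizes, 2 ≤ s.length
instance (sizes : List (List Int)) : Decidable (Pre_solution sizes) := by unfold Pre_solution; infer_instance
def pvWitness_solution : List (List Int) := [[60, 50], [30, 70], [60, 30], [80, 40]]
def Spec_solution (sizes : List (List Int)) (out : Int) : Prop := out = solution_alt sizes
instance (sizes : List (List Int)) (out : Int) : Decidable (Spec_solution sizes out) := by unfold Spec_solution; infer_instance

-- ===== CLAIM =====
def Claim_equal_solution : Prop := ∀ (sizes : List (List Int)), Dom_solution sizes → Pre_solution sizes → Spec_solution sizes (solution sizes)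

-- ===== LEMMAS AND PROOFS =====

def pvBig (s : List Int) : Int := max ((PySem.List.pyGet? s 0).getD 0) ((PySem.List.pyGet? s 1).getD 0)
def pvSmall (s : List Int) : Int := min ((PySem.List.pyGet? s 0).getD 0) ((PySem.List.pyGet? s 1).getD 0)

-- A's fold appends exactly the bigger side to x and the smaller side to y.
theorem solution_foldl_eq (sizes : List (List Int)) : ∀ (x0 y0 : List Int),
    sizes.foldl (fun (xy : List Int × List Int) size =>
      let a := (PySem.List.pyGet? size 0).getD 0
      let b := (PySem.List.pyGet? size 1).getD 0
      if a > b then (xy.1 ++ [a], xy.2 ++ [b]) else (xy.1 ++ [b], xy.2 ++ [a])) (x0, y0)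
    = (x0 ++ sizes.map pvBig, y0 ++ sizes.map pvSmall) := by
  induction sizes with
  | nil => simp
  | cons s t ih =>
    intro x0 y0
    simp only [List.foldl_cons, List.map_cons]
    by_cases h : (PySem.List.pyGet? s 0).getD 0 > (PySem.List.pyGet? s 1).getD 0
    · simp only [h, if_pos, ih]
      simp [pvBig, pvSmall, max_eq_left (le_of_lt h), min_eq_right (le_of_lt h)]
    · simp only [h, if_neg, ih, not_false_iff]
      rw [not_lt] at h
      simp [pvBig, pvSmall, max_eq_right h, min_eq_left h]

-- B's recursion computes the running maxima of the big and small sides.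
theorem pvRect_eq (t : List (List Int)) : ∀ (s : List Int),
    pvRect (s :: t) = ((t.map pvBig).foldl max (pvBig s), (t.map pvSmall).foldl max (pvSmall s)) := by
  induction t with
  | nil =>
    intro s
    simp only [pvRect, List.map_nil, List.foldl_nil]
    by_cases h : (PySem.List.pyGet? s 0).getD 0 ≥ (PySem.List.pyGet? s 1).getD 0
    · simp [h, pvBig, pvSmall]
    · rw [not_le] at h
      simp [not_le.mpr h, pvBig, pvSmall, max_eq_right (le_of_lt h), min_eq_left (le_of_lt h)]
  | cons s' t' ih =>
    intro s
    simp only [pvRect, ih s', List.map_cons, List.foldl_cons]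
    rw [← List.foldl_assoc (op := max), ← List.foldl_assoc (op := max)]
    by_cases h : (PySem.List.pyGet? s 0).getD 0 ≥ (PySem.List.pyGet? s 1).getD 0
    · simp [h, pvBig, pvSmall]
    · rw [not_le] at h
      simp [not_le.mpr h, pvBig, pvSmall, max_eq_right (le_of_lt h), min_eq_left (le_of_lt h)]

-- ===== VERDICT =====
theorem solution_spec : Claim_equal_solution := by
  intro sizes _ hpre
  obtain ⟨hne, -⟩ := hpre
  obtain ⟨s, t, rfl⟩ : ∃ s t, sizes = s :: t := by
    cases sizes with
    | nil => exact absurd rfl hne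
    | cons s t => exact ⟨s, t, rfl⟩
  unfold Spec_solution solution solution_alt
  simp only [solution_foldl_eq, List.nil_append, List.map_cons, pvRect_eq,
    PySem.List.max?_id_cons, Option.getD_some]
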